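-- pv_equiv track=rewrite | github.com/teradadacodez/openenv-rl | inference.py | generate_max_reward_message
-- ===== SOURCE A (Python) =====
-- MAX_MESSAGE_LENGTH = 180
--
-- def generate_max_reward_message(step: int) -> str:
--     base = f"Step {step} maximizing reward. "
--     filler = "ABCDEFGHIJKLMNOPQRSTUVWXYZabcdefghijklmnopqrstuvwxyz0123456789 "
--
--     msg = base
--     i = 0
--     while len(msg) < MAX_MESSAGE_LENGTH:
--         msg += filler[i % len(filler)]
--         i += 1
--
--     return msg[:MAX_MESSAGE_LENGTH]
-- ===== SOURCE B (Python) =====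
-- MAX_MESSAGE_LENGTH = 180
--
-- def generate_max_reward_message(step: int) -> str:
--     base = f"Step {step} maximizing reward. "
--     filler = "ABCDEFGHIJKLMNOPQRSTUVWXYZabcdefghijklmnopqrstuvwxyz0123456789 "
--     needed = MAX_MESSAGE_LENGTH - len(base)
--     if needed <= 0:
--         return base[:MAX_MESSAGE_LENGTH]
--     reps = needed // len(filler) + 1
--     return (base + filler * reps)[:MAX_MESSAGE_LENGTH]
-- ===== Notes on version B (the rewrite author's own statement) =====
-- stated objective: simpler
-- what changed: Replaces the char-by-char while-loop accumulation with a closed-form repeat-and-slice: compute the needed padding length, tile the filler enough times once, and truncate to 180.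
import Mathlib
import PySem

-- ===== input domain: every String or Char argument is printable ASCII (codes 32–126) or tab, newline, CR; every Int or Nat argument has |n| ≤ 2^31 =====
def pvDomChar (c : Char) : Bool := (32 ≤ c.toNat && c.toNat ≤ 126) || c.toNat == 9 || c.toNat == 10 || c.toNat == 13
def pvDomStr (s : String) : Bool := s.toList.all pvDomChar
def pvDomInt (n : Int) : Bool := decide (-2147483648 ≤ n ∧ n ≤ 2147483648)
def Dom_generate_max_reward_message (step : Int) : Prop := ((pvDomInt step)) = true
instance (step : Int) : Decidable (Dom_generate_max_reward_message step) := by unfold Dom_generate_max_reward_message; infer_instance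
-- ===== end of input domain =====

-- ===== PORT A =====
-- B replaces A's char-by-char padding loop with closed-form repeat-and-slice (simpler).
def pvFiller : List Char := "ABCDEFGHIJKLMNOPQRSTUVWXYZabcdefghijklmnopqrstuvwxyz0123456789 ".toList

-- the while-loop of A: append filler[i % 64] while len(msg) < 180
-- (filler[i % len(filler)] with i ≥ 0 and 0 ≤ i % 64 < 64 is always in range, so getD is exact here)
def pvLoopA (msg : List Char) (i : Nat) : List Char :=
  if msg.length < 180 then pvLoopA (msg ++ [pvFiller.getD (i % pvFiller.length) ' ']) (i + 1) else msg
termination_by 180 - msg.length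
decreasing_by simp; omega

def generate_max_reward_message (step : Int) : String :=
  let base := ("Step " ++ PySem.Int.toStr step ++ " maximizing reward. ").toList
  String.mk ((pvLoopA base 0).take 180)

-- ===== PORT B =====
def generate_max_reward_message_alt (step : Int) : String :=
  let base := ("Step " ++ PySem.Int.toStr step ++ " maximizing reward. ").toList
  let needed : Int := 180 - (base.length : Int)
  if needed ≤ 0 then String.mk (base.take 180)
  else
    let reps : Int := PySem.Int.floordiv needed (pvFiller.length : Int) + 1
    String.mk ((base ++ (List.replicate reps.toNat pvFiller).flatten).take 180)

-- ===== PRECONDITION & SPEC =====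
def Spec_generate_max_reward_message (step : Int) (out : String) : Prop := out = generate_max_reward_message_alt step
instance (step : Int) (out : String) : Decidable (Spec_generate_max_reward_message step out) := by unfold Spec_generate_max_reward_message; infer_instance

-- ===== CLAIM (what is proved, stated in full; the proofs are below) =====
def Claim_equal_generate_max_reward_message : Prop := ∀ (step : Int), Dom_generate_max_reward_message step → Spec_generate_max_reward_message step (generate_max_reward_message step)

-- ===== LEMMAS AND PROOFS =====

theorem pvFiller_len : pvFiller.length = 63 := by decide

-- characterization of A's loop
theorem pvLoopA_eq (n : Nat) : ∀ (msg : List Char) (i : Nat), msg.length + n = 180 →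
    pvLoopA msg i = msg ++ (List.range n).map (fun j => pvFiller.getD ((i + j) % 63) ' ') := by
  induction n with
  | zero =>
    intro msg i h
    rw [pvLoopA, if_neg (by omega)]
    simp
  | succ n ih =>
    intro msg i h
    rw [pvLoopA, if_pos (by omega), pvFiller_len]
    rw [ih (msg ++ [pvFiller.getD (i % 63) ' ']) (i + 1) (by simp; omega)]
    rw [List.range_succ_eq_map, List.map_cons, List.map_map]
    simp only [Nat.add_zero, List.append_assoc, List.singleton_append]
    congr 2
    apply List.map_congr_left
    intro j _
    simp only [Function.comp_apply]
    congr 1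
    omega

-- a short prefix of the filler as a range-map
theorem take_pvFiller (n : Nat) (h : n ≤ 63) :
    pvFiller.take n = (List.range n).map (fun j => pvFiller.getD (j % 63) ' ') := by
  apply List.ext_getElem
  · simp [pvFiller_len]; omega
  · intro j h1 h2
    have hj : j < 63 := by simp [pvFiller_len] at h1; omega
    simp [Nat.mod_eq_of_lt hj, List.getD_eq_getElem?_getD,
      List.getElem?_eq_getElem (by simp [pvFiller_len]; omega : j < pvFiller.length)]

-- the truncated tiled filler, element by element
theorem take_flatten_replicate : ∀ (m n : Nat), n ≤ 63 * m →
    (List.flatten (List.replicate m pvFiller)).take n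
      = (List.range n).map (fun j => pvFiller.getD (j % 63) ' ') := by
  intro m
  induction m with
  | zero =>
    intro n h
    have : n = 0 := by omega
    simp [this]
  | succ m ih =>
    intro n h
    rw [List.replicate_succ, List.flatten_cons]
    by_cases hn : n ≤ 63
    · rw [List.take_append_of_le_length (by simp [pvFiller_len]; omega)]
      exact take_pvFiller n hn
    · have hr : (List.range n).map (fun j => pvFiller.getD (j % 63) ' ')
          = pvFiller ++ (List.range (n - 63)).map (fun j => pvFiller.getD (j % 63) ' ') := by
        conv_lhs => rw [show n = 63 + (n - 63) from by omega]
        rw [List.range_add, List.map_append]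
        have h1 := take_pvFiller 63 le_rfl
        rw [List.take_of_length_le (by rw [pvFiller_len])] at h1
        rw [← h1, List.map_map]
        congr 1
        apply List.map_congr_left
        intro j _
        simp only [Function.comp_apply]
        congr 1
        omega
      rw [hr, List.take_append,
        List.take_of_length_le (show pvFiller.length ≤ n by rw [pvFiller_len]; omega),
        pvFiller_len, ih (n - 63) (by omega)]

-- the whole equivalence, as a function of the already-built base string
theorem pv_main (base : List Char) :
    String.mk ((pvLoopA base 0).take 180)
      = (if (180 - (base.length : Int)) ≤ 0 then String.mk (base.take 180)
         else String.mk ((base ++ (List.replicate (PySem.Int.floordiv (180 - (base.length : Int)) (pvFiller.length : Int) + 1).toNat pvFiller).flatten).take 180)) := by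
  by_cases hb : base.length < 180
  · set n : Nat := 180 - base.length with hn
    rw [if_neg (by omega)]
    rw [pvLoopA_eq n base 0 (by omega)]
    have hfd : PySem.Int.floordiv (180 - (base.length : Int)) (pvFiller.length : Int)
        = ((n / 63 : Nat) : Int) := by
      rw [pvFiller_len]
      rw [show (180 - (base.length : Int)) = ((n : Nat) : Int) from by omega]
      exact_mod_cast PySem.Int.floordiv_natCast n 63
    rw [hfd, show (((n / 63 : Nat) : Int) + 1).toNat = n / 63 + 1 from by omega]
    congr 1
    rw [List.take_of_length_le (by simp; omega)]
    rw [show (180 : Nat) = base.length + n from by omega, List.take_append,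
      List.take_of_length_le (show base.length ≤ base.length + n by omega),
      show base.length + n - base.length = n from by omega,
      take_flatten_replicate (n / 63 + 1) n (by omega)]
    simp
  · rw [if_pos (by omega), pvLoopA, if_neg (by omega)]

-- ===== VERDICT (by name: the statement is the Claim_ definition above) =====
theorem generate_max_reward_message_spec : Claim_equal_generate_max_reward_message := by
  intro step _
  unfold Spec_generate_max_reward_message generate_max_reward_message generate_max_reward_message_alt
  exact pv_main _
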